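-- pv_equiv track=rewrite | github.com/lee197/D-A-Practise | Interview/MS.py | len_concatenation
-- ===== SOURCE A (Python) =====
-- from collections import Counter
--
-- def len_concatenation(arr):
--     def is_unique(s):
--         cnt = Counter(s)
--         if len(cnt) != len(s):
--             return False
--         else:
--             return True
--
--     res = 0
--     arr.append("")
--
--     for i in range(0, len(arr)):
--         if len(set(arr[i])) < len(arr[i]): continue
--         for j in range(i + 1, len(arr)):
--             concat_str = arr[i] + arr[j]
--             if is_unique(concat_str) and len(concat_str) > res:
--                 res = len(concat_str)
--     return res
-- ===== SOURCE B (Python) =====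
-- def len_concatenation(arr):
--     # One pass over arr: skip duplicate strings, keep one (bitmask, length) entry per distinct
--     # character-mask of the duplicate-free strings (a mask determines the length); pairs are then
--     # tested with a single bitwise AND. Unlike A, B does not mutate arr.
--     seen_s = set()
--     seen_m = set()
--     masks = []
--     for s in arr:
--         if s in seen_s:
--             continue
--         seen_s.add(s)
--         if len(set(s)) != len(s):
--             continue
--         m = 0
--         for c in s:
--             m |= 1 << ord(c)
--         if m not in seen_m:
--             seen_m.add(m)
--             masks.append((m, len(s)))
--     best = 0
--     for i, (m1, l1) in enumerate(masks):
--         if l1 > best: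
--             best = l1
--         for m2, l2 in masks[i + 1:]:
--             if (m1 & m2) == 0 and l1 + l2 > best:
--                 best = l1 + l2
--     return best
-- ===== Notes on version B (the rewrite author's own statement) =====
-- stated objective: faster
-- what changed: B makes one pass that deduplicates strings, rejects strings with repeated characters, and keeps a single (bitmask, length) entry per distinct character mask, then tests each pair of entries with one bitwise AND, instead of A's rebuilding a Counter of the concatenation for every index pair; singles are handled directly rather than by appending an empty string. A mutates arr (appends ""); B does not — the equivalence is about the return value.
import Mathlib
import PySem

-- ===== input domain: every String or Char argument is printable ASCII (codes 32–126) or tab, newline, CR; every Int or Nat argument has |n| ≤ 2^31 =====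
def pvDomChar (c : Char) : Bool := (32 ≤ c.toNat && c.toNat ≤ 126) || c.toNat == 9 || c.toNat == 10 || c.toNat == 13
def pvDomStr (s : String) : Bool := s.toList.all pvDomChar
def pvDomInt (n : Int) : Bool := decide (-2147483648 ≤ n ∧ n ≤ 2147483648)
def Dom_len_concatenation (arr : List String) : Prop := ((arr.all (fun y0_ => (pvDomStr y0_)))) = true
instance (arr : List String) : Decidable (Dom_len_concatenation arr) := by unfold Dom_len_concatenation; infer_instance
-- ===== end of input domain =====

-- B replaces A's per-pair Counter over the concatenation by one precomputed character bitmask per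
-- string and an O(1) bitwise-AND test per pair (objective: faster). The Python A mutates arr
-- (arr.append("")); B does not — the equivalence proved here is about the return value only.

-- ===== PORT A =====
-- is_unique(s): Counter length equals string length (strings handled via their character lists)
def pyIsUnique (s : List Char) : Bool :=
  let cnt := PySem.Dict.counter s
  if ¬ ((cnt.size : Int) = PySem.List.len s) then false else true

def len_concatenation (arr : List String) : Int :=
  let arr2 := arr ++ [""]
  (PySem.List.pyRange 0 (PySem.List.len arr2)).foldl (fun res i =>
    let ai := (PySem.List.pyGetD arr2 i "").toList
    if PySem.Set.len (PySem.Set.ofList ai) < PySem.List.len ai then res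
    else
      (PySem.List.pyRange (i + 1) (PySem.List.len arr2)).foldl (fun res j =>
        let concatStr := ai ++ (PySem.List.pyGetD arr2 j "").toList
        if pyIsUnique concatStr = true ∧ PySem.List.len concatStr > res then PySem.List.len concatStr
        else res) res) 0

-- ===== PORT B =====
-- the loop over 'enumerate(masks)': head entry (single-string candidate), then pairs with the tail
def bestLoop (best : Int) : List (Nat × Int) → Int
  | [] => best
  | (m1, l1) :: rest =>
    let b1 := if l1 > best then l1 else best
    bestLoop (rest.foldl (fun b p => if m1 &&& p.1 = 0 ∧ l1 + p.2 > b then l1 + p.2 else b) b1) rest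

-- the body of B's first loop: dedup by string, uniqueness test, dedup by mask
def bStep (st : (PySem.Set String × PySem.Set Nat) × List (Nat × Int)) (s : String) :
    (PySem.Set String × PySem.Set Nat) × List (Nat × Int) :=
  if PySem.Set.contains st.1.1 s then st
  else
    let seenS := PySem.Set.add st.1.1 s
    if ¬ (PySem.Set.len (PySem.Set.ofList s.toList) = PySem.Str.len s) then ((seenS, st.1.2), st.2)
    else
      let m := s.toList.foldl (fun (m : Nat) (c : Char) => m ||| 2 ^ c.toNat) 0
      if PySem.Set.contains st.1.2 m then ((seenS, st.1.2), st.2)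
      else ((seenS, PySem.Set.add st.1.2 m), st.2 ++ [(m, PySem.Str.len s)])

def len_concatenation_alt (arr : List String) : Int :=
  let st := arr.foldl bStep ((PySem.Set.empty, PySem.Set.empty), [])
  bestLoop 0 st.2

-- ===== PRECONDITION & SPEC =====
def Spec_len_concatenation (arr : List String) (out : Int) : Prop := out = len_concatenation_alt arr
instance (arr : List String) (out : Int) : Decidable (Spec_len_concatenation arr out) := by unfold Spec_len_concatenation; infer_instance

-- ===== CLAIM (what is proved, stated in full; the proofs are below) =====
def Claim_equal_len_concatenation : Prop := ∀ (arr : List String), Dom_len_concatenation arr → Spec_len_concatenation arr (len_concatenation arr)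

-- ===== LEMMAS AND PROOFS =====

-- the mask of a duplicate-free character list, with failure on a repeat (proof-side view of B's test)
def maskOf (m : Nat) : List Char → Option Nat
  | [] => some m
  | c :: t =>
    let b := 2 ^ c.toNat
    if m &&& b ≠ 0 then none else maskOf (m ||| b) t

-- the (mask, length) entry of a string, as filterMap'd over by the proofs
def maskEntry (s : String) : Option (Nat × Int) :=
  (maskOf 0 s.toList).map (fun m => (m, PySem.Str.len s))

-- A's outer loop, written structurally on the tails of arr ++ [""]
def loopA : Int → List String → Int
  | res, [] => res
  | res, a :: rest =>
    let ai := a.toList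
    if PySem.Set.len (PySem.Set.ofList ai) < PySem.List.len ai then loopA res rest
    else
      loopA ((rest.foldl (fun res b =>
        let concatStr := ai ++ b.toList
        if pyIsUnique concatStr = true ∧ PySem.List.len concatStr > res then PySem.List.len concatStr
        else res) res)) rest

-- per-head candidate lengths among the later mask entries
def candList (m1 : Nat) (l1 : Int) (rest : List (Nat × Int)) : List Int :=
  (rest.filter (fun p => decide (m1 &&& p.1 = 0))).map (fun p => l1 + p.2)

-- A's shape on mask entries: only pair candidates
def gA : Int → List (Nat × Int) → Int
  | res, [] => res
  | res, (m1, l1) :: rest => gA ((candList m1 l1 rest).foldl max res) rest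

-- B's shape on mask entries: the single candidate, then the pair candidates
def gB : Int → List (Nat × Int) → Int
  | res, [] => res
  | res, (m1, l1) :: rest => gB ((candList m1 l1 rest).foldl max (max res l1)) rest

-- --- small set/counter facts ---
theorem char_toNat_inj (a b : Char) (h : a.toNat = b.toNat) : a = b := by
  apply Char.ext
  unfold Char.toNat at h
  exact UInt32.toNat_inj.mp h

theorem ofList_toFinset (l : List Char) : (PySem.Set.ofList l : List Char).toFinset = l.toFinset := by
  ext x
  simp [List.mem_toFinset, PySem.Set.mem_ofList]

theorem ofList_length_eq_iff (l : List Char) :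
    ((PySem.Set.ofList l : List Char).length = l.length ↔ l.Nodup) ∧
    (PySem.Set.ofList l : List Char).length ≤ l.length := by
  have hcard : (PySem.Set.ofList l : List Char).length = l.toFinset.card := by
    rw [← ofList_toFinset l]
    exact (List.toFinset_card_of_nodup (PySem.Set.nodup_ofList l)).symm
  have hiff : (l.toFinset.card = l.length ↔ l.Nodup) := by
    simpa using Multiset.toFinset_card_eq_card_iff_nodup (m := (l : Multiset Char))
  exact ⟨hcard ▸ hiff, hcard ▸ List.toFinset_card_le l⟩

theorem set_test_iff (l : List Char) :
    (PySem.Set.len (PySem.Set.ofList l) < PySem.List.len l) ↔ ¬ l.Nodup := by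
  obtain ⟨hiff, hle⟩ := ofList_length_eq_iff l
  simp only [PySem.Set.len, PySem.List.len_eq]
  rw [← hiff]
  omega

theorem pyIsUnique_iff (l : List Char) : pyIsUnique l = true ↔ l.Nodup := by
  obtain ⟨hiff, hle⟩ := ofList_length_eq_iff l
  have hsize : (PySem.Dict.counter l).size = (PySem.Set.ofList l : List Char).length := by
    have hk := PySem.Dict.keys_counter l
    have : (PySem.Dict.counter l).keys.length = (PySem.Set.ofList l : List Char).length := by rw [hk]
    simpa [PySem.Dict.keys, PySem.Dict.size] using this
  simp only [pyIsUnique, PySem.List.len_eq, hsize]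
  split_ifs with h
  · simpa using hiff.mp (by exact_mod_cast h)
  · simp only [false_iff]
    intro hnd
    exact h (by exact_mod_cast hiff.mpr hnd)

-- --- mask facts ---
theorem tb_and_pow (m i : Nat) : m &&& 2 ^ i = 0 ↔ m.testBit i = false := by
  rw [Nat.and_two_pow]
  cases h : m.testBit i <;> simp

theorem maskOf_some_spec (l : List Char) : ∀ (m m' : Nat), maskOf m l = some m' →
    ((l.map Char.toNat).Nodup ∧ (∀ c ∈ l, m.testBit c.toNat = false) ∧
     ∀ k, (m'.testBit k ↔ (m.testBit k ∨ k ∈ l.map Char.toNat))) := by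
  induction l with
  | nil => intro m m' h; simp [maskOf] at h; subst h; simp
  | cons c t ih =>
    intro m m' h
    simp only [maskOf] at h
    split at h
    · exact absurd h (by simp)
    · rename_i hb
      have hb0 : m &&& 2 ^ c.toNat = 0 := by simpa using hb
      have hmc : m.testBit c.toNat = false := (tb_and_pow m c.toNat).mp hb0
      obtain ⟨hnd, hfree, hbits⟩ := ih (m ||| 2 ^ c.toNat) m' h
      refine ⟨?_, ?_, ?_⟩
      · simp only [List.map_cons, List.nodup_cons]
        refine ⟨?_, hnd⟩
        intro hmem
        obtain ⟨d, hd, hdc⟩ := List.mem_map.mp hmem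
        have := hfree d hd
        rw [Nat.testBit_or, hdc, Nat.testBit_two_pow] at this
        simp at this
      · intro d hd
        rcases List.mem_cons.mp hd with rfl | hdt
        · exact hmc
        · have := hfree d hdt
          rw [Nat.testBit_or] at this
          exact (Bool.or_eq_false_iff.mp this).1
      · intro k
        rw [hbits k, Nat.testBit_or, Nat.testBit_two_pow]
        simp only [List.map_cons, List.mem_cons]
        constructor
        · rintro (h1 | h2)
          · rcases Bool.or_eq_true_iff.mp h1 with h3 | h3
            · exact Or.inl h3
            · exact Or.inr (Or.inl (Eq.symm (by simpa using h3)))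
          · exact Or.inr (Or.inr h2)
        · rintro (h1 | h2)
          · exact Or.inl (by simp [h1])
          · rcases h2 with rfl | h3
            · exact Or.inl (by simp)
            · exact Or.inr h3

theorem maskOf_eq_some (l : List Char) : ∀ (m : Nat),
    (l.map Char.toNat).Nodup → (∀ c ∈ l, m.testBit c.toNat = false) →
    maskOf m l = some (l.foldl (fun (m : Nat) (c : Char) => m ||| 2 ^ c.toNat) m) := by
  induction l with
  | nil => intro m _ _; rfl
  | cons c t ih =>
    intro m hnd hfree
    simp only [List.map_cons, List.nodup_cons] at hnd
    have hmc : m.testBit c.toNat = false := hfree c (List.mem_cons_self ..)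
    simp only [maskOf, List.foldl_cons]
    rw [if_neg (by simp [(tb_and_pow m c.toNat).mpr hmc])]
    apply ih
    · exact hnd.2
    · intro d hd
      rw [Nat.testBit_or, hfree d (List.mem_cons_of_mem _ hd), Nat.testBit_two_pow]
      simp only [Bool.false_or, decide_eq_false_iff_not]
      intro hcd
      exact hnd.1 (hcd ▸ List.mem_map_of_mem hd)
theorem nodup_map_toNat_iff (l : List Char) : (l.map Char.toNat).Nodup ↔ l.Nodup := by
  rw [List.nodup_map_iff]
  intro a b h
  exact char_toNat_inj a b h

theorem maskOf_zero_eq_none_iff (l : List Char) : maskOf 0 l = none ↔ ¬ l.Nodup := by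
  constructor
  · intro h hnd
    have := maskOf_eq_some l 0 ((nodup_map_toNat_iff l).mpr hnd) (by simp)
    rw [h] at this; simp at this
  · intro hnd
    cases h : maskOf 0 l with
    | none => rfl
    | some m' =>
      exact absurd ((nodup_map_toNat_iff l).mp (maskOf_some_spec l 0 m' h).1) hnd

theorem and_eq_zero_iff (m1 m2 : Nat) :
    m1 &&& m2 = 0 ↔ ∀ k, m1.testBit k = false ∨ m2.testBit k = false := by
  constructor
  · intro h k
    have : (m1 &&& m2).testBit k = false := by rw [h]; exact Nat.zero_testBit k
    rw [Nat.testBit_and] at this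
    exact Bool.and_eq_false_iff.mp this
  · intro h
    apply Nat.eq_of_testBit_eq
    intro k
    rw [Nat.testBit_and, Nat.zero_testBit]
    rcases h k with h1 | h1 <;> simp [h1]

-- disjointness of two successful masks = no shared character
theorem mask_disjoint_iff (a b : List Char) (m1 m2 : Nat)
    (h1 : maskOf 0 a = some m1) (h2 : maskOf 0 b = some m2) :
    (m1 &&& m2 = 0) ↔ ∀ x ∈ a, ∀ y ∈ b, x ≠ y := by
  obtain ⟨_, _, hb1⟩ := maskOf_some_spec a 0 m1 h1
  obtain ⟨_, _, hb2⟩ := maskOf_some_spec b 0 m2 h2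
  rw [and_eq_zero_iff]
  constructor
  · intro h x hx y hy hxy
    rcases h x.toNat with hf | hf
    · have : m1.testBit x.toNat := (hb1 x.toNat).mpr (Or.inr (List.mem_map_of_mem hx))
      rw [hf] at this; simp at this
    · have : m2.testBit y.toNat := (hb2 y.toNat).mpr (Or.inr (List.mem_map_of_mem hy))
      rw [← hxy] at this
      rw [hf] at this; simp at this
  · intro h k
    by_cases hk1 : m1.testBit k = true
    · right
      rcases (hb1 k).mp hk1 with h0 | hmem
      · simp at h0
      · obtain ⟨x, hx, rfl⟩ := List.mem_map.mp hmem
        by_cases hk2 : m2.testBit x.toNat = true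
        · rcases (hb2 _).mp hk2 with h0 | hmem2
          · simp at h0
          · obtain ⟨y, hy, hxy⟩ := List.mem_map.mp hmem2
            exact absurd (char_toNat_inj y x hxy) (Ne.symm (h x hx y hy))
        · simpa using hk2
    · left
      simpa using hk1

-- --- bridging port A to loopA ---
theorem bridge_outer (arr2 : List String) : ∀ (t : Nat) (k : Int) (res : Int), 0 ≤ k →
    k + t = arr2.length →
    (PySem.List.pyRange k (arr2.length : Int)).foldl (fun res i =>
      let ai := (PySem.List.pyGetD arr2 i "").toList
      if PySem.Set.len (PySem.Set.ofList ai) < PySem.List.len ai then res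
      else
        (PySem.List.pyRange (i + 1) (arr2.length : Int)).foldl (fun res j =>
          let concatStr := ai ++ (PySem.List.pyGetD arr2 j "").toList
          if pyIsUnique concatStr = true ∧ PySem.List.len concatStr > res then PySem.List.len concatStr
          else res) res) res
    = loopA res (arr2.drop k.toNat) := by
  intro t
  induction t with
  | zero =>
    intro k res hk ht
    rw [PySem.List.pyRange_one_eq_nil (by omega)]
    have hkn : k.toNat = arr2.length := by omega
    rw [List.foldl_nil, hkn, List.drop_length]
    rfl
  | succ t ih =>
    intro k res hk ht
    have hklt : k < (arr2.length : Int) := by omega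
    have hkn : k.toNat < arr2.length := by omega
    rw [PySem.List.pyRange_one_cons hklt, List.foldl_cons]
    rw [List.drop_eq_getElem_cons hkn]
    simp only [loopA]
    rw [PySem.List.pyGetD_eq_getElem arr2 "" hk hklt]
    have hdrop : (k + 1).toNat = k.toNat + 1 := by omega
    have hinner := PySem.List.foldl_pyRange_pyGetD' arr2 ""
      (fun res b =>
        let concatStr := arr2[k.toNat].toList ++ b.toList
        if pyIsUnique concatStr = true ∧ PySem.List.len concatStr > res then PySem.List.len concatStr
        else res) res (a := k + 1) (by omega)
    simp only [] at hinner ⊢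
    rw [hinner, hdrop]
    have ih' := ih (k + 1)
    simp only [] at ih'
    rw [hdrop] at ih'
    split_ifs with hset
    · exact ih' res (by omega) (by omega)
    · rw [ih' _ (by omega) (by omega)]

theorem A_eq_loopA (arr : List String) : len_concatenation arr = loopA 0 (arr ++ [""]) := by
  have h := bridge_outer (arr ++ [""]) (arr ++ [""]).length 0 0 le_rfl (by simp)
  simp only [Int.toNat_zero, List.drop_zero] at h
  unfold len_concatenation
  simp only [PySem.List.len_eq]
  exact h

-- --- loopA = gA on the mask entries ---
theorem foldl_filterMap_skip {α β γ : Type} (g : α → Option β) (F : γ → α → γ) (f : γ → β → γ)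
    (l : List α) (hn : ∀ x ∈ l, g x = none → ∀ acc, F acc x = acc)
    (hs : ∀ x ∈ l, ∀ y, g x = some y → ∀ acc, F acc x = f acc y) :
    ∀ init, l.foldl F init = (l.filterMap g).foldl f init := by
  induction l with
  | nil => intro init; rfl
  | cons x t ih =>
    intro init
    have hxmem : x ∈ x :: t := List.mem_cons_self ..
    cases hg : g x with
    | none =>
      rw [List.filterMap_cons_none hg, List.foldl_cons, hn x hxmem hg init]
      exact ih (fun z hz => hn z (List.mem_cons_of_mem _ hz))
        (fun z hz => hs z (List.mem_cons_of_mem _ hz)) init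
    | some y =>
      rw [List.filterMap_cons_some hg, List.foldl_cons, List.foldl_cons, hs x hxmem y hg init]
      exact ih (fun z hz => hn z (List.mem_cons_of_mem _ hz))
        (fun z hz => hs z (List.mem_cons_of_mem _ hz)) _

theorem inner_to_cand (m1 : Nat) (l1 : Int) (rest : List (Nat × Int)) : ∀ b : Int,
    rest.foldl (fun b p => if m1 &&& p.1 = 0 ∧ l1 + p.2 > b then l1 + p.2 else b) b
      = (candList m1 l1 rest).foldl max b := by
  induction rest with
  | nil => intro b; rfl
  | cons p t ih =>
    intro b
    simp only [List.foldl_cons, candList]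
    by_cases hp : m1 &&& p.1 = 0
    · rw [List.filter_cons_of_pos (by simpa using hp), List.map_cons, List.foldl_cons]
      have hstep : (if m1 &&& p.1 = 0 ∧ l1 + p.2 > b then l1 + p.2 else b) = max b (l1 + p.2) := by
        split_ifs with h <;> omega
      rw [hstep]
      simpa [candList] using ih (max b (l1 + p.2))
    · rw [List.filter_cons_of_neg (by simpa using hp), if_neg (by tauto)]
      simpa [candList] using ih b

theorem maskEntry_none_iff (a : String) : maskEntry a = none ↔ ¬ a.toList.Nodup := by
  rw [← maskOf_zero_eq_none_iff]
  cases h : maskOf 0 a.toList <;> simp [maskEntry, h]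

theorem loopA_eq_gA (ys : List String) : ∀ res, loopA res ys = gA res (ys.filterMap maskEntry) := by
  induction ys with
  | nil => intro res; rfl
  | cons a t ih =>
    intro res
    by_cases hnd : a.toList.Nodup
    · obtain ⟨m1, hm1⟩ : ∃ m1, maskOf 0 a.toList = some m1 := by
        cases h : maskOf 0 a.toList with
        | none => exact absurd ((maskOf_zero_eq_none_iff _).mp h) (by simpa using hnd)
        | some m => exact ⟨m, rfl⟩
      have hme : maskEntry a = some (m1, PySem.Str.len a) := by simp [maskEntry, hm1]
      rw [List.filterMap_cons_some hme]
      simp only [loopA, gA]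
      rw [if_neg (by rw [set_test_iff]; simpa using hnd)]
      have hinner : t.foldl (fun res b =>
            let concatStr := a.toList ++ b.toList
            if pyIsUnique concatStr = true ∧ PySem.List.len concatStr > res then PySem.List.len concatStr
            else res) res
          = (t.filterMap maskEntry).foldl (fun b p =>
              if m1 &&& p.1 = 0 ∧ PySem.Str.len a + p.2 > b then PySem.Str.len a + p.2 else b) res := by
        apply foldl_filterMap_skip
        · intro b _ hbn acc
          have hbnd : ¬ b.toList.Nodup := (maskEntry_none_iff b).mp hbn
          have hcat : ¬ (a.toList ++ b.toList).Nodup := fun h => hbnd (List.nodup_append.mp h).2.1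
          simp only []
          rw [if_neg]
          intro hc
          exact hcat ((pyIsUnique_iff _).mp hc.1)
        · intro b _ y hby acc
          obtain ⟨m2, hm2, hy⟩ : ∃ m2, maskOf 0 b.toList = some m2 ∧ y = (m2, PySem.Str.len b) := by
            cases h : maskOf 0 b.toList with
            | none => rw [maskEntry, h] at hby; simp at hby
            | some m => rw [maskEntry, h] at hby; simp at hby; exact ⟨m, rfl, hby.symm⟩
          subst hy
          have hbnd : b.toList.Nodup :=
            (nodup_map_toNat_iff _).mp (maskOf_some_spec b.toList 0 m2 hm2).1
          have hU : pyIsUnique (a.toList ++ b.toList) = true ↔ (m1 &&& m2 = 0) := by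
            rw [pyIsUnique_iff, List.nodup_append, mask_disjoint_iff _ _ _ _ hm1 hm2]
            tauto
          have hlen : PySem.List.len (a.toList ++ b.toList) = PySem.Str.len a + PySem.Str.len b := by
            simp [PySem.List.len_eq, PySem.Str.len_eq]
          simp only []
          rw [if_congr (by rw [hU, hlen]) hlen rfl]
      rw [hinner, inner_to_cand, ih]
    · have hme : maskEntry a = none := (maskEntry_none_iff a).mpr hnd
      rw [List.filterMap_cons_none hme]
      simp only [loopA]
      rw [if_pos ((set_test_iff _).mpr hnd)]
      exact ih res

-- --- bestLoop = gB ---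
theorem bestLoop_eq_gB (ms : List (Nat × Int)) : ∀ res, bestLoop res ms = gB res ms := by
  induction ms with
  | nil => intro res; rfl
  | cons p t ih =>
    obtain ⟨m1, l1⟩ := p
    intro res
    simp only [bestLoop, gB]
    have hb1 : (if l1 > res then l1 else res) = max res l1 := by split_ifs with h <;> omega
    rw [hb1, inner_to_cand, ih]

-- --- gA with the trailing empty-string entry = gB ---
theorem foldl_max_comm (pc : List Int) : ∀ (res x : Int), pc.foldl max (max res x) = max (pc.foldl max res) x := by
  induction pc with
  | nil => intro res x; rfl
  | cons a t ih =>
    intro res x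
    simp only [List.foldl_cons]
    rw [max_right_comm res x a, ih]

theorem gA_append_zero (ms : List (Nat × Int)) : ∀ res, gA res (ms ++ [(0, 0)]) = gB res ms := by
  induction ms with
  | nil =>
    intro res
    simp only [List.nil_append, gA, gB, candList, List.filter_nil, List.map_nil, List.foldl_nil]
  | cons p t ih =>
    obtain ⟨m1, l1⟩ := p
    intro res
    simp only [List.cons_append, gA, gB]
    have hcand : candList m1 l1 (t ++ [(0, 0)]) = candList m1 l1 t ++ [l1] := by
      simp [candList, List.filter_append, Nat.and_zero]
    rw [hcand, List.foldl_append, List.foldl_cons, List.foldl_nil, ← foldl_max_comm, ih]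


-- --- B's dedup loop yields a key-covering sublist of the (mask, length) entries ---
theorem contains_add_iff {α : Type} [BEq α] [LawfulBEq α] (s : PySem.Set α) (x m : α) :
    PySem.Set.contains (PySem.Set.add s x) m = true ↔ (PySem.Set.contains s m = true ∨ m = x) := by
  simp only [PySem.Set.add, PySem.Set.contains]
  split_ifs with h
  · simp only [List.contains_eq_mem, decide_eq_true_eq]
    constructor
    · exact Or.inl
    · rintro (h' | rfl)
      · exact h'
      · simpa using h
  · simp [List.contains_eq_mem]

theorem set_eq_test_iff (s : String) :
    (PySem.Set.len (PySem.Set.ofList s.toList) = PySem.Str.len s) ↔ s.toList.Nodup := by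
  obtain ⟨hiff, _⟩ := ofList_length_eq_iff s.toList
  rw [← hiff]
  simp [PySem.Set.len, PySem.Str.len_eq]

theorem maskEntry_eq_some (s : String) (hnd : s.toList.Nodup) :
    maskEntry s = some (s.toList.foldl (fun (m : Nat) (c : Char) => m ||| 2 ^ c.toNat) 0, PySem.Str.len s) := by
  rw [maskEntry, maskOf_eq_some _ 0 ((nodup_map_toNat_iff _).mpr hnd) (by simp)]
  rfl

theorem bd_results (ss : List String) : ∀ (st : (PySem.Set String × PySem.Set Nat) × List (Nat × Int)),
    (∀ m, PySem.Set.contains st.1.2 m = true ↔ m ∈ st.2.map Prod.fst) →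
    (∀ s : String, PySem.Set.contains st.1.1 s = true → ∀ y, maskEntry s = some y → y.1 ∈ st.2.map Prod.fst) →
    (∃ t, (ss.foldl bStep st).2 = st.2 ++ t ∧ t.Sublist (ss.filterMap maskEntry)) ∧
    (∀ e ∈ ss.filterMap maskEntry, ∃ e' ∈ (ss.foldl bStep st).2, e'.1 = e.1) := by
  induction ss with
  | nil => intro st _ _; exact ⟨⟨[], by simp, List.Sublist.refl _⟩, by simp⟩
  | cons s ss ih =>
    intro st hinv1 hinv2
    rw [List.foldl_cons]
    by_cases hseen : PySem.Set.contains st.1.1 s = true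
    · -- duplicate string: the step is the identity
      have hstep : bStep st s = st := by unfold bStep; rw [if_pos hseen]
      rw [hstep]
      obtain ⟨⟨t, ht, hsub⟩, hcov⟩ := ih st hinv1 hinv2
      cases hms : maskEntry s with
      | none =>
        rw [List.filterMap_cons_none hms]
        exact ⟨⟨t, ht, hsub⟩, hcov⟩
      | some e0 =>
        rw [List.filterMap_cons_some hms]
        refine ⟨⟨t, ht, hsub.cons e0⟩, ?_⟩
        intro e he
        rcases List.mem_cons.mp he with rfl | he2
        · obtain ⟨e', he', hk⟩ := List.mem_map.mp (hinv2 s hseen e hms)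
          exact ⟨e', by rw [ht]; exact List.mem_append_left _ he', hk⟩
        · exact hcov e he2
    · by_cases hnd : s.toList.Nodup
      · have hme := maskEntry_eq_some s hnd
        rw [List.filterMap_cons_some hme]
        by_cases hm : PySem.Set.contains st.1.2 (s.toList.foldl (fun (m : Nat) (c : Char) => m ||| 2 ^ c.toNat) 0) = true
        · -- new string, unique chars, but its mask was already recorded
          have hstep : bStep st s = ((PySem.Set.add st.1.1 s, st.1.2), st.2) := by
            unfold bStep
            rw [if_neg hseen, if_neg (not_not_intro ((set_eq_test_iff s).mpr hnd)), if_pos hm]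
          rw [hstep]
          have hinv2' : ∀ s' : String, PySem.Set.contains (PySem.Set.add st.1.1 s) s' = true →
              ∀ y, maskEntry s' = some y → y.1 ∈ st.2.map Prod.fst := by
            intro s' hs' y hy
            rcases (contains_add_iff st.1.1 s s').mp hs' with hold | rfl
            · exact hinv2 s' hold y hy
            · rw [hme] at hy
              cases hy
              exact (hinv1 _).mp hm
          obtain ⟨⟨t, ht, hsub⟩, hcov⟩ := ih ((PySem.Set.add st.1.1 s, st.1.2), st.2) hinv1 hinv2'
          refine ⟨⟨t, ht, hsub.cons _⟩, ?_⟩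
          intro e he
          rcases List.mem_cons.mp he with rfl | he2
          · obtain ⟨e', he', hk⟩ := List.mem_map.mp ((hinv1 _).mp hm)
            exact ⟨e', by rw [ht]; exact List.mem_append_left _ he', hk⟩
          · exact hcov e he2
        · -- new string, unique chars, new mask: the entry is appended
          have hstep : bStep st s = ((PySem.Set.add st.1.1 s,
              PySem.Set.add st.1.2 (s.toList.foldl (fun (m : Nat) (c : Char) => m ||| 2 ^ c.toNat) 0)),
              st.2 ++ [(s.toList.foldl (fun (m : Nat) (c : Char) => m ||| 2 ^ c.toNat) 0, PySem.Str.len s)]) := by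
            unfold bStep
            rw [if_neg hseen, if_neg (not_not_intro ((set_eq_test_iff s).mpr hnd)), if_neg hm]
          rw [hstep]
          have hinv1' : ∀ m, PySem.Set.contains
              (PySem.Set.add st.1.2 (s.toList.foldl (fun (m : Nat) (c : Char) => m ||| 2 ^ c.toNat) 0)) m = true ↔
              m ∈ ((st.2 ++ [(s.toList.foldl (fun (m : Nat) (c : Char) => m ||| 2 ^ c.toNat) 0, PySem.Str.len s)]).map Prod.fst) := by
            intro m
            rw [contains_add_iff, hinv1 m]
            simp
          have hinv2' : ∀ s' : String, PySem.Set.contains (PySem.Set.add st.1.1 s) s' = true →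
              ∀ y, maskEntry s' = some y →
              y.1 ∈ ((st.2 ++ [(s.toList.foldl (fun (m : Nat) (c : Char) => m ||| 2 ^ c.toNat) 0, PySem.Str.len s)]).map Prod.fst) := by
            intro s' hs' y hy
            rcases (contains_add_iff st.1.1 s s').mp hs' with hold | rfl
            · have := hinv2 s' hold y hy
              simpa using Or.inl this
            · rw [hme] at hy
              cases hy
              simp
          obtain ⟨⟨t, ht, hsub⟩, hcov⟩ := ih ((PySem.Set.add st.1.1 s,
              PySem.Set.add st.1.2 (s.toList.foldl (fun (m : Nat) (c : Char) => m ||| 2 ^ c.toNat) 0)),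
              st.2 ++ [(s.toList.foldl (fun (m : Nat) (c : Char) => m ||| 2 ^ c.toNat) 0, PySem.Str.len s)]) hinv1' hinv2'
          refine ⟨⟨(s.toList.foldl (fun (m : Nat) (c : Char) => m ||| 2 ^ c.toNat) 0, PySem.Str.len s) :: t,
            by rw [ht]; simp, hsub.cons₂ _⟩, ?_⟩
          intro e he
          rcases List.mem_cons.mp he with rfl | he2
          · exact ⟨(s.toList.foldl (fun (m : Nat) (c : Char) => m ||| 2 ^ c.toNat) 0, PySem.Str.len s),
              by rw [ht]; exact List.mem_append_left _ (List.mem_append_right _ (by simp)), rfl⟩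
          · exact hcov e he2
      · -- new string with a repeated character: no entry
        have hms : maskEntry s = none := (maskEntry_none_iff s).mpr hnd
        rw [List.filterMap_cons_none hms]
        have hstep : bStep st s = ((PySem.Set.add st.1.1 s, st.1.2), st.2) := by
          unfold bStep
          rw [if_neg hseen, if_pos (fun h => hnd ((set_eq_test_iff s).mp h))]
        rw [hstep]
        have hinv2' : ∀ s' : String, PySem.Set.contains (PySem.Set.add st.1.1 s) s' = true →
            ∀ y, maskEntry s' = some y → y.1 ∈ st.2.map Prod.fst := by
          intro s' hs' y hy
          rcases (contains_add_iff st.1.1 s s').mp hs' with hold | rfl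
          · exact hinv2 s' hold y hy
          · rw [hms] at hy; cases hy
        exact ih ((PySem.Set.add st.1.1 s, st.1.2), st.2) hinv1 hinv2'

-- a mask determines the length of any string that produced it
theorem mask_length {a b : List Char} {m : Nat} (h1 : maskOf 0 a = some m)
    (h2 : maskOf 0 b = some m) : a.length = b.length := by
  obtain ⟨hnd1, _, hb1⟩ := maskOf_some_spec a 0 m h1
  obtain ⟨hnd2, _, hb2⟩ := maskOf_some_spec b 0 m h2
  have hperm : (a.map Char.toNat).Perm (b.map Char.toNat) := by
    rw [List.perm_ext_iff_of_nodup hnd1 hnd2]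
    intro k
    have e1 := hb1 k
    have e2 := hb2 k
    simp only [Nat.zero_testBit, Bool.false_eq_true, false_or] at e1 e2
    rw [← e1, ← e2]
  simpa using hperm.length_eq

theorem mask_zero_len {a : List Char} (h : maskOf 0 a = some 0) : a.length = 0 := by
  have : maskOf 0 ([] : List Char) = some 0 := rfl
  simpa using mask_length h this

-- all candidate lengths that gB's loop maximises over
def allC : List (Nat × Int) → List Int
  | [] => []
  | (m1, l1) :: rest => (l1 :: candList m1 l1 rest) ++ allC rest

theorem gB_eq_max (ms : List (Nat × Int)) : ∀ res, gB res ms = (allC ms).foldl max res := by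
  induction ms with
  | nil => intro res; rfl
  | cons p t ih =>
    obtain ⟨m1, l1⟩ := p
    intro res
    simp only [gB, allC]
    rw [List.foldl_append, List.foldl_cons, ih]

theorem single_mem_allC (ms : List (Nat × Int)) (e : Nat × Int) (he : e ∈ ms) : e.2 ∈ allC ms := by
  induction ms with
  | nil => cases he
  | cons p t ih =>
    obtain ⟨m1, l1⟩ := p
    rcases List.mem_cons.mp he with rfl | h2
    · simp [allC]
    · exact List.mem_append_right _ (ih h2)

theorem pair_mem_allC (ms : List (Nat × Int)) (e1 e2 : Nat × Int) (h1 : e1 ∈ ms) (h2 : e2 ∈ ms)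
    (hne : e1.1 ≠ e2.1) (hdis : e1.1 &&& e2.1 = 0) : e1.2 + e2.2 ∈ allC ms := by
  induction ms with
  | nil => cases h1
  | cons p t ih =>
    obtain ⟨m1, l1⟩ := p
    simp only [allC]
    rcases List.mem_cons.mp h1 with rfl | h1t
    · have h2t : e2 ∈ t := by
        rcases List.mem_cons.mp h2 with rfl | h2t
        · exact absurd rfl hne
        · exact h2t
      apply List.mem_append_left
      apply List.mem_cons_of_mem
      unfold candList
      exact List.mem_map.mpr ⟨e2, List.mem_filter.mpr ⟨h2t, by simpa using hdis⟩, rfl⟩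
    · rcases List.mem_cons.mp h2 with rfl | h2t
      · apply List.mem_append_left
        apply List.mem_cons_of_mem
        unfold candList
        refine List.mem_map.mpr ⟨e1, List.mem_filter.mpr ⟨h1t, ?_⟩, by omega⟩
        simpa [Nat.land_comm] using hdis
      · exact List.mem_append_right _ (ih h1t h2t)

theorem allC_cases (ms : List (Nat × Int)) (x : Int) (hx : x ∈ allC ms) :
    (∃ e ∈ ms, x = e.2) ∨
    (∃ e1 ∈ ms, ∃ e2 ∈ ms, e1.1 &&& e2.1 = 0 ∧ x = e1.2 + e2.2) := by
  induction ms with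
  | nil => cases hx
  | cons p t ih =>
    obtain ⟨m1, l1⟩ := p
    simp only [allC] at hx
    rcases List.mem_append.mp hx with hl | hr
    · rcases List.mem_cons.mp hl with h0 | hc
      · exact Or.inl ⟨(m1, l1), List.mem_cons_self .., h0⟩
      · obtain ⟨e2, he2, hval⟩ := List.mem_map.mp hc
        have hf := List.mem_filter.mp he2
        refine Or.inr ⟨(m1, l1), List.mem_cons_self .., e2, List.mem_cons_of_mem _ hf.1, ?_, hval.symm⟩
        simpa using hf.2
    · rcases ih hr with ⟨e, he, hv⟩ | ⟨e1, he1, e2, he2, hd, hv⟩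
      · exact Or.inl ⟨e, List.mem_cons_of_mem _ he, hv⟩
      · exact Or.inr ⟨e1, List.mem_cons_of_mem _ he1, e2, List.mem_cons_of_mem _ he2, hd, hv⟩

theorem allC_sublist {ms' ms : List (Nat × Int)} (h : ms'.Sublist ms) :
    ∀ x ∈ allC ms', x ∈ allC ms := by
  induction h with
  | slnil => intro x hx; cases hx
  | cons p _ ih =>
    intro x hx
    rename_i ms2 _
    obtain ⟨m1, l1⟩ := p
    exact List.mem_append_right _ (ih x hx)
  | cons₂ p hsub ih =>
    intro x hx
    obtain ⟨m1, l1⟩ := p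
    rcases List.mem_append.mp hx with hl | hr
    · rcases List.mem_cons.mp hl with rfl | hc
      · apply List.mem_append_left; exact List.mem_cons_self ..
      · apply List.mem_append_left
        apply List.mem_cons_of_mem
        unfold candList at hc ⊢
        exact ((hsub.filter _).map _).subset hc
    · exact List.mem_append_right _ (ih x hr)

theorem foldl_max_eq (E D : List Int) (res : Int)
    (h1 : ∀ x ∈ E, ∃ y ∈ D, x ≤ y) (h2 : ∀ y ∈ D, y ∈ E) :
    E.foldl max res = D.foldl max res := by
  apply le_antisymm
  · rcases PySem.List.foldl_max_mem E res with h | h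
    · rw [h]; exact (PySem.List.le_foldl_max D res).1
    · obtain ⟨y, hy, hxy⟩ := h1 _ h
      exact le_trans hxy ((PySem.List.le_foldl_max D res).2 y hy)
  · rcases PySem.List.foldl_max_mem D res with h | h
    · rw [h]; exact (PySem.List.le_foldl_max E res).1
    · exact (PySem.List.le_foldl_max E res).2 _ (h2 _ h)

theorem gB_dedup (E D : List (Nat × Int)) (hsub : D.Sublist E)
    (hcover : ∀ e ∈ E, ∃ e' ∈ D, e'.1 = e.1)
    (hmask : ∀ e ∈ E, ∃ a : List Char, maskOf 0 a = some e.1 ∧ e.2 = (a.length : Int)) :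
    ∀ res, gB res E = gB res D := by
  intro res
  rw [gB_eq_max, gB_eq_max]
  apply foldl_max_eq
  · intro x hx
    have hval : ∀ e ∈ E, ∀ e' ∈ D, e'.1 = e.1 → e'.2 = e.2 := by
      intro e he e' he' hk
      obtain ⟨a, ham, hal⟩ := hmask e he
      obtain ⟨a', ham', hal'⟩ := hmask e' (hsub.subset he')
      rw [hal, hal']
      rw [hk] at ham'
      exact_mod_cast mask_length ham' ham
    rcases allC_cases E x hx with ⟨e, he, hv⟩ | ⟨e1, he1, e2, he2, hd, hv⟩
    · obtain ⟨e', he', hk⟩ := hcover e he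
      exact ⟨e'.2, single_mem_allC D e' he', by rw [hv, hval e he e' he' hk]⟩
    · obtain ⟨e1', he1', hk1⟩ := hcover e1 he1
      obtain ⟨e2', he2', hk2⟩ := hcover e2 he2
      by_cases hmm : e1.1 = e2.1
      · -- equal disjoint masks are 0, so both lengths are 0
        have hm0 : e1.1 = 0 := by
          have := hd
          rw [hmm, Nat.and_self] at this
          rw [hmm, this]
        have hz : ∀ e ∈ E, e.1 = 0 → e.2 = 0 := by
          intro e he h0
          obtain ⟨a, ham, hal⟩ := hmask e he
          rw [h0] at ham
          rw [hal]
          exact_mod_cast mask_zero_len ham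
        refine ⟨e1'.2, single_mem_allC D e1' he1', ?_⟩
        rw [hv, hz e1 he1 hm0, hz e2 he2 (by rw [← hmm]; exact hm0),
          hz e1' (hsub.subset he1') (by rw [hk1]; exact hm0)]
        simp
      · refine ⟨e1'.2 + e2'.2, pair_mem_allC D e1' e2' he1' he2' ?_ ?_, ?_⟩
        · rw [hk1, hk2]; exact hmm
        · rw [hk1, hk2]; exact hd
        · rw [hv, hval e1 he1 e1' he1' hk1, hval e2 he2 e2' he2' hk2]
  · exact allC_sublist hsub

-- ===== VERDICT (by name: the statement is the Claim_ definition above) =====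
theorem len_concatenation_spec : Claim_equal_len_concatenation := by
  intro arr _
  unfold Spec_len_concatenation len_concatenation_alt
  show len_concatenation arr =
    bestLoop 0 (arr.foldl bStep ((PySem.Set.empty, PySem.Set.empty), [])).2
  obtain ⟨⟨t, ht, hsubl⟩, hcov⟩ := bd_results arr ((PySem.Set.empty, PySem.Set.empty), [])
    (by intro m; simp [PySem.Set.empty, PySem.Set.contains])
    (by intro s' hs'; simp [PySem.Set.empty, PySem.Set.contains] at hs')
  rw [ht]
  simp only [List.nil_append]
  have hmask : ∀ e ∈ arr.filterMap maskEntry,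
      ∃ a : List Char, maskOf 0 a = some e.1 ∧ e.2 = (a.length : Int) := by
    intro e he
    obtain ⟨s, _, hse⟩ := List.mem_filterMap.mp he
    obtain ⟨m, hm, he'⟩ : ∃ m, maskOf 0 s.toList = some m ∧ e = (m, PySem.Str.len s) := by
      cases h : maskOf 0 s.toList with
      | none => rw [maskEntry, h] at hse; simp at hse
      | some m => rw [maskEntry, h] at hse; simp at hse; exact ⟨m, rfl, hse.symm⟩
    subst he'
    exact ⟨s.toList, hm, by simp [PySem.Str.len_eq]⟩
  have hcov' : ∀ e ∈ arr.filterMap maskEntry, ∃ e' ∈ t, e'.1 = e.1 := by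
    intro e he
    obtain ⟨e', he', hk⟩ := hcov e he
    rw [ht] at he'
    exact ⟨e', by simpa using he', hk⟩
  rw [A_eq_loopA, loopA_eq_gA, List.filterMap_append]
  have h1 : List.filterMap maskEntry [""] = [((0 : Nat), (0 : Int))] := by decide
  rw [h1, gA_append_zero, bestLoop_eq_gB]
  exact gB_dedup (arr.filterMap maskEntry) t hsubl hcov' hmask 0
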